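-- pv_equiv track=rewrite | github.com/GibleGuy/awesome_repo | a3.py | equal_remove
-- ===== SOURCE A (Python) =====
-- def occurs_more(x,y,lst):
--     if not lst:
--         return True
--     count_x = 0
--     count_y = 0
--     for item in lst:
--         if item == x:
--             count_x += 1
--         if item == y:
--             count_y += 1
--     if count_x > count_y:
--         return True
--     else:
--         return False
--
-- def equal_remove(x,y,lst):
--     while True:
--         if occurs_more(x, y, lst):
--             lst.remove(x)
--         elif occurs_more(y, x, lst):
--             lst.remove(y)
--         else:
--             return lst
-- ===== SOURCE B (Python) =====
-- def equal_remove(x, y, lst):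
--     # Count once, then delete the first |cx-cy| copies of the majority value in one pass.
--     # Note: A mutates lst in place; B leaves lst untouched (return value is the same).
--     cx = lst.count(x)
--     cy = lst.count(y)
--     if cx == cy:
--         return lst
--     e, k = (x, cx - cy) if cx > cy else (y, cy - cx)
--     out = []
--     for item in lst:
--         if k and item == e:
--             k -= 1
--         else:
--             out.append(item)
--     return out
-- ===== Notes on version B (the rewrite author's own statement) =====
-- stated objective: alternative
-- what changed: B counts x and y once and deletes the first |cx-cy| copies of the majority value in a single pass, instead of A's loop that rescans the whole list to recount and calls list.remove once per excess copy.
-- outside the precondition, e.g. on equal_remove(0, 1, []): A raises ValueError, B returns []; on equal_remove(0, 1, [0, 0]): A raises ValueError, B returns []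
-- crash fix: On the empty list, and on a nonempty list whose elements are all x or all y (with x != y), A raises ValueError from lst.remove on a missing element; B returns the empty list. — e.g. on equal_remove(0, 1, [0, 0]): A raises ValueError, B returns []
import Mathlib
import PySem

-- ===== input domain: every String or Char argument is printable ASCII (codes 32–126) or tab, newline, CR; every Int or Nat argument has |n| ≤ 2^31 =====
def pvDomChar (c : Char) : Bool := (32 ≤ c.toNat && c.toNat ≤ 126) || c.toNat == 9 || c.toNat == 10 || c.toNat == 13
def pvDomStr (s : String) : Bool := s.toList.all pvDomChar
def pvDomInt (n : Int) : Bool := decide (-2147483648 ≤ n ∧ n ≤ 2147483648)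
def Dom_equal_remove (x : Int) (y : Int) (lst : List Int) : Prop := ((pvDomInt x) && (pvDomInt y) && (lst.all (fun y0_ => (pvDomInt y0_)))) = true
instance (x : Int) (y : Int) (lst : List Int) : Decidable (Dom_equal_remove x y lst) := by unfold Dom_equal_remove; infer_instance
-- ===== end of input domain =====

-- B counts x and y once and deletes the first |cx-cy| copies of the majority value in a
-- single pass, instead of A's recount-and-remove loop; A mutates lst in place, B does not —
-- the equivalence proved here is about the RETURN value only.

-- ===== PORT A =====
-- occurs_more: empty list counts as True; otherwise compares the two loop counters.
def pvOccursMore (x y : Int) (lst : List Int) : Bool :=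
  if lst = [] then true
  else
    let c := lst.foldl (fun (s : Int × Int) item =>
      let s1 := if item == x then (s.1 + 1, s.2) else s
      if item == y then (s1.1, s1.2 + 1) else s1) (0, 0)
    decide (c.1 > c.2)

-- the 'while True' loop; fuel lst.length+1 bounds the ≤ lst.length removals plus the
-- final check; 'none' is Python's ValueError from lst.remove on a missing element.
def pvEqLoop (x y : Int) : Nat → List Int → Option (List Int)
  | 0, lst => some lst
  | fuel + 1, lst =>
    if pvOccursMore x y lst then
      match PySem.List.remove? lst x with
      | some l => pvEqLoop x y fuel l
      | none => none
    else if pvOccursMore y x lst then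
      match PySem.List.remove? lst y with
      | some l => pvEqLoop x y fuel l
      | none => none
    else some lst

def equal_remove (x : Int) (y : Int) (lst : List Int) : List Int :=
  (pvEqLoop x y (lst.length + 1) lst).getD []

-- ===== PORT B =====
-- one pass dropping the first k copies of e ('if k and item == e' in Source B)
def pvDropFirst (e : Int) : Nat → List Int → List Int
  | _, [] => []
  | k, h :: t => if k ≠ 0 ∧ h = e then pvDropFirst e (k - 1) t else h :: pvDropFirst e k t

def equal_remove_alt (x : Int) (y : Int) (lst : List Int) : List Int :=
  let cx := lst.count x
  let cy := lst.count y
  if cx = cy then lst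
  else if cy < cx then pvDropFirst x (cx - cy) lst
  else pvDropFirst y (cy - cx) lst

-- ===== PRECONDITION & SPEC =====
-- Pre_ excludes exactly the inputs where A raises ValueError (lst.remove on a missing
-- element): the empty list, and a nonempty list all of whose elements equal the majority
-- argument while x ≠ y (the loop then empties the list and removes once more).
def Pre_equal_remove (x : Int) (y : Int) (lst : List Int) : Prop :=
  lst ≠ [] ∧ (x = y ∨ ((∃ e ∈ lst, e ≠ x) ∧ (∃ e ∈ lst, e ≠ y)))
instance (x : Int) (y : Int) (lst : List Int) : Decidable (Pre_equal_remove x y lst) := by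
  unfold Pre_equal_remove; infer_instance

def pvWitness_equal_remove : Int × Int × List Int := (0, 1, [0, 0, 1])

-- On these inputs A raises ValueError (remove of a missing element) while B returns the
-- empty list, the natural result of deleting all excess copies.
def Raises_equal_remove (x : Int) (y : Int) (lst : List Int) : Prop :=
  lst = [] ∨ (x ≠ y ∧ ((∀ e ∈ lst, e = x) ∨ (∀ e ∈ lst, e = y)))
instance (x : Int) (y : Int) (lst : List Int) : Decidable (Raises_equal_remove x y lst) := by
  unfold Raises_equal_remove; infer_instance

def pvRaiseWitness_equal_remove : Int × Int × List Int := (0, 1, [0, 0])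
def pvRaiseWitnessOut_equal_remove : List Int := []

def Spec_equal_remove (x : Int) (y : Int) (lst : List Int) (out : List Int) : Prop :=
  out = equal_remove_alt x y lst
instance (x : Int) (y : Int) (lst : List Int) (out : List Int) : Decidable (Spec_equal_remove x y lst out) := by
  unfold Spec_equal_remove; infer_instance

-- ===== CLAIM (what is proved, stated in full; the proofs are below) =====
def Claim_equal_equal_remove : Prop := ∀ (x : Int) (y : Int) (lst : List Int), Dom_equal_remove x y lst → Pre_equal_remove x y lst → Spec_equal_remove x y lst (equal_remove x y lst)
def Claim_raises_equal_remove : Prop := (∀ (x : Int) (y : Int) (lst : List Int), Dom_equal_remove x y lst → Raises_equal_remove x y lst → ¬ Pre_equal_remove x y lst) ∧ (Dom_equal_remove (pvRaiseWitness_equal_remove.1) (pvRaiseWitness_equal_remove.2.1) (pvRaiseWitness_equal_remove.2.2) ∧ Raises_equal_remove (pvRaiseWitness_equal_remove.1) (pvRaiseWitness_equal_remove.2.1) (pvRaiseWitness_equal_remove.2.2) ∧ equal_remove_alt (pvRaiseWitness_equal_remove.1) (pvRaiseWitness_equal_remove.2.1) (pvRaiseWitness_equal_remove.2.2) = pvR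aiseWitnessOut_equal_remove)

-- ===== LEMMAS AND PROOFS =====

-- the counting loop of occurs_more computes the two List.counts
lemma pvCountFold (x y : Int) (lst : List Int) (s : Int × Int) :
    lst.foldl (fun (s : Int × Int) item =>
      let s1 := if item == x then (s.1 + 1, s.2) else s
      if item == y then (s1.1, s1.2 + 1) else s1) s
    = (s.1 + lst.count x, s.2 + lst.count y) := by
  induction lst generalizing s with
  | nil => simp
  | cons h t ih =>
    rw [List.foldl_cons, ih]
    simp only [List.count_cons]
    by_cases hxy : x = y
    · subst hxy
      by_cases hx : h = x <;>
        simp [hx, Prod.ext_iff] <;> omega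
    · by_cases hx : h = x <;> by_cases hy : h = y <;>
        simp [hx, hy, hxy, Ne.symm hxy, Prod.ext_iff] <;> omega

lemma pvOccursMore_eq (x y : Int) (lst : List Int) (h : lst ≠ []) :
    pvOccursMore x y lst = decide (lst.count y < lst.count x) := by
  simp only [pvOccursMore, if_neg h]
  rw [pvCountFold]
  simp

lemma pvDropFirst_zero (e : Int) (lst : List Int) : pvDropFirst e 0 lst = lst := by
  induction lst with
  | nil => rfl
  | cons h t ih => simp [pvDropFirst, ih]

lemma pvDropFirst_succ (e : Int) (k : Nat) (lst : List Int) (h : e ∈ lst) :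
    pvDropFirst e (k + 1) lst = pvDropFirst e k (lst.erase e) := by
  induction lst with
  | nil => cases h
  | cons a t ih =>
    by_cases ha : a = e
    · subst ha
      simp [pvDropFirst, List.erase_cons_head]
    · have ht : e ∈ t := by
        cases List.mem_cons.mp h with
        | inl h' => exact absurd h'.symm ha
        | inr h' => exact h'
      rw [List.erase_cons_tail (by simp [ha])]
      simp [pvDropFirst, ha, ih ht]

-- the loop returns the list unchanged when the counts are already equal
lemma pvLoop_ret (x y : Int) (fuel : Nat) (lst : List Int) (hne : lst ≠ [])
    (heq : lst.count x = lst.count y) (hf : 0 < fuel) :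
    pvEqLoop x y fuel lst = some lst := by
  cases fuel with
  | zero => omega
  | succ f =>
    simp [pvEqLoop, pvOccursMore_eq _ _ _ hne, heq]

-- x is the strict majority: the loop removes the first k excess copies of x
lemma pvLoop_x (x y : Int) (hxy : x ≠ y) :
    ∀ (k fuel : Nat) (lst : List Int), lst.count x = lst.count y + k →
      (∃ e ∈ lst, e ≠ x) → k < fuel →
      pvEqLoop x y fuel lst = some (pvDropFirst x k lst) := by
  intro k
  induction k with
  | zero =>
    intro fuel lst hc ⟨e, he, _⟩ hf
    rw [pvDropFirst_zero]
    exact pvLoop_ret x y fuel lst (List.ne_nil_of_mem he) (by omega) hf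
  | succ k ih =>
    intro fuel lst hc ⟨e, he, hex⟩ hf
    have hxmem : x ∈ lst := List.count_pos_iff.mp (by omega)
    have hne : lst ≠ [] := List.ne_nil_of_mem hxmem
    cases fuel with
    | zero => omega
    | succ f =>
      simp only [pvEqLoop, pvOccursMore_eq _ _ _ hne, decide_eq_true_eq]
      rw [if_pos (by omega), PySem.List.remove?_eq_some_erase lst x hxmem]
      have hcx : (lst.erase x).count x = lst.count y + k := by
        rw [List.count_erase_self]; omega
      have hcy : (lst.erase x).count y = lst.count y := List.count_erase_of_ne (Ne.symm hxy)
      rw [pvDropFirst_succ x k lst hxmem]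
      exact ih f (lst.erase x) (by omega) ⟨e, (List.mem_erase_of_ne hex).mpr he, hex⟩ (by omega)

-- y is the strict majority: the loop removes the first k excess copies of y
lemma pvLoop_y (x y : Int) (hxy : x ≠ y) :
    ∀ (k fuel : Nat) (lst : List Int), lst.count y = lst.count x + k →
      (∃ e ∈ lst, e ≠ y) → k < fuel →
      pvEqLoop x y fuel lst = some (pvDropFirst y k lst) := by
  intro k
  induction k with
  | zero =>
    intro fuel lst hc ⟨e, he, _⟩ hf
    rw [pvDropFirst_zero]
    exact pvLoop_ret x y fuel lst (List.ne_nil_of_mem he) (by omega) hf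
  | succ k ih =>
    intro fuel lst hc ⟨e, he, hey⟩ hf
    have hymem : y ∈ lst := List.count_pos_iff.mp (by omega)
    have hne : lst ≠ [] := List.ne_nil_of_mem hymem
    cases fuel with
    | zero => omega
    | succ f =>
      simp only [pvEqLoop, pvOccursMore_eq _ _ _ hne, decide_eq_true_eq]
      rw [if_neg (by omega), if_pos (by omega), PySem.List.remove?_eq_some_erase lst y hymem]
      have hcy : (lst.erase y).count y = lst.count x + k := by
        rw [List.count_erase_self]; omega
      have hcx : (lst.erase y).count x = lst.count x := List.count_erase_of_ne hxy
      rw [pvDropFirst_succ y k lst hymem]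
      exact ih f (lst.erase y) (by omega) ⟨e, (List.mem_erase_of_ne hey).mpr he, hey⟩ (by omega)

-- ===== VERDICT (by name: the statement is the Claim_ definition above) =====
theorem equal_remove_spec : Claim_equal_equal_remove := by
  intro x y lst _ hpre
  obtain ⟨hne, hrest⟩ := hpre
  unfold Spec_equal_remove equal_remove equal_remove_alt
  by_cases hxy : x = y
  · subst hxy
    rw [pvLoop_ret x x (lst.length + 1) lst hne rfl (by omega)]
    simp
  · obtain ⟨⟨ex, hexm, hex⟩, ⟨ey, heym, hey⟩⟩ := hrest.resolve_left hxy
    rcases Nat.lt_trichotomy (lst.count x) (lst.count y) with hlt | heq | hgt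
    · have hk : lst.count y = lst.count x + (lst.count y - lst.count x) := by omega
      rw [pvLoop_y x y hxy (lst.count y - lst.count x) (lst.length + 1) lst hk
        ⟨ey, heym, hey⟩ (by have := List.count_le_length (l := lst) (a := y); omega)]
      simp only [Option.getD_some]
      rw [if_neg (by omega), if_neg (by omega)]
    · rw [pvLoop_ret x y (lst.length + 1) lst hne heq (by omega)]
      simp [heq]
    · have hk : lst.count x = lst.count y + (lst.count x - lst.count y) := by omega
      rw [pvLoop_x x y hxy (lst.count x - lst.count y) (lst.length + 1) lst hk
        ⟨ex, hexm, hex⟩ (by have := List.count_le_length (l := lst) (a := x); omega)]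
      simp only [Option.getD_some]
      rw [if_neg (by omega), if_pos (by omega)]

theorem equal_remove_raises : Claim_raises_equal_remove := by
  unfold Claim_raises_equal_remove
  constructor
  · intro x y lst _ hr hp
    obtain ⟨hne, hrest⟩ := hp
    rcases hr with h | ⟨hxy, hall⟩
    · exact hne h
    · obtain ⟨⟨ex, hexm, hex⟩, ⟨ey, heym, hey⟩⟩ := hrest.resolve_left hxy
      rcases hall with h | h
      · exact hex (h ex hexm)
      · exact hey (h ey heym)
  · refine ⟨by decide, by decide, by decide⟩

-- self-check: by equal_remove_raises, the raise witness's input lies outside Pre_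
theorem pvRaiseWitness_ok : ¬ Pre_equal_remove 0 1 [0, 0] :=
  equal_remove_raises.1 0 1 [0, 0] (by decide) (by decide)
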